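-- pv_equiv track=rewrite | github.com/istoilkovska/syncTA | helper.py | dfs
-- ===== SOURCE A (Python) =====
-- def dfs(graph, vertex, explored=None, path=None):
--     """
--     Depth first search to compute length of the paths in the graph starting from vertex
--     """
--     if explored == None:
--         explored = []
--     if path == None:
--         path = 0
--
--     explored.append(vertex)
--
--     len_paths = []
--     for w in graph[vertex]:
--         if w not in explored:
--             new_path = path + 1
--             len_paths.append(new_path)
--             len_paths.extend(dfs(graph, w, explored[:], new_path))
--
--     return len_paths
-- ===== SOURCE B (Python) =====
-- def dfs(graph, vertex, explored=None, path=None):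
--     """
--     Same path-length enumeration, but via an inner walker that appends into one
--     shared result list and tracks the forbidden vertices as a frozenset, instead
--     of building and concatenating per-call lists with copied explored lists.
--     (Like the original, appends `vertex` to a caller-supplied `explored` list.)
--     """
--     if explored is None:
--         explored = []
--     if path is None:
--         path = 0
--
--     explored.append(vertex)
--
--     out = []
--
--     def walk(v, blocked, depth):
--         for w in graph[v]:
--             if w not in blocked:
--                 out.append(depth)
--                 walk(w, blocked | {w}, depth + 1)
--
--     walk(vertex, frozenset(explored), path + 1)
--     return out
-- ===== Notes on version B (the rewrite author's own statement) =====
-- stated objective: alternative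
-- what changed: A's self-recursion that builds a fresh len_paths per call (append + extend of recursive results, explored passed as a copied list) is replaced by an inner walker that appends every length into one shared result list and carries the forbidden vertices as a frozenset grown functionally (blocked | {w}), with no list concatenation or explored copying.
import Mathlib
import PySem

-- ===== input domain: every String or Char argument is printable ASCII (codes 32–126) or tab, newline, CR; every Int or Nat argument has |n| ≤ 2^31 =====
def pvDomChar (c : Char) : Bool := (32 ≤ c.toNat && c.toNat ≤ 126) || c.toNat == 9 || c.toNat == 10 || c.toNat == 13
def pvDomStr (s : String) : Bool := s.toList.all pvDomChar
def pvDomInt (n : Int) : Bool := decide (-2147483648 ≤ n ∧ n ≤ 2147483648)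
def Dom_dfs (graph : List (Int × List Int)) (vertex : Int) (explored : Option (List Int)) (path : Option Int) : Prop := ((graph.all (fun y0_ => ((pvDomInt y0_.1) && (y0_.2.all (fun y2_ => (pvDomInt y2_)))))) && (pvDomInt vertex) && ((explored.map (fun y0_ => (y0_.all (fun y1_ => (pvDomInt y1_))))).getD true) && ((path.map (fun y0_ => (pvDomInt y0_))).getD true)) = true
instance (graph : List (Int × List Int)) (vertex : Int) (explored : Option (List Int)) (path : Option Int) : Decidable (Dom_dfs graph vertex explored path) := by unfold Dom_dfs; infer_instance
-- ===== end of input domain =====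

-- B replaces A's per-call list building (append/extend, copied explored lists) by an inner walker
-- threading one shared accumulator, with the forbidden vertices kept in a frozenset.
-- (Python A and B both append `vertex` to a caller-supplied `explored` list; the equivalence here is about the return value.)

-- Python dict lookup graph[v] (first matching key)
def dfsGet? (graph : List (Int × List Int)) (v : Int) : Option (List Int) :=
  PySem.Dict.get? (PySem.Dict.mk graph) v

-- all vertices occurring in adjacency lists (with multiplicity); only used for termination measures
def dfsUniv (graph : List (Int × List Int)) : List Int := graph.flatMap Prod.snd

def dfsM (graph : List (Int × List Int)) (e : List Int) : Nat :=
  ((dfsUniv graph).filter (fun x => decide (x ∉ e))).length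

-- lemmas the ports cite for termination
theorem dfsGet?_sub (graph : List (Int × List Int)) (v : Int) (ns : List Int)
    (h : dfsGet? graph v = some ns) : ∀ x ∈ ns, x ∈ dfsUniv graph := by
  induction graph with
  | nil => simp [dfsGet?, PySem.Dict.get?] at h
  | cons p rest ih =>
    rw [dfsGet?, PySem.Dict.get?_mk_cons] at h
    by_cases hp : p.1 == v
    · simp only [hp, if_pos] at h
      injection h with h
      subst h
      intro x hx
      exact List.mem_flatMap.mpr ⟨p, List.mem_cons_self .., hx⟩
    · rw [if_neg (by simp_all)] at h
      intro x hx
      have := ih (by rwa [dfsGet?]) x hx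
      simp only [dfsUniv, List.flatMap_cons, List.mem_append]
      exact Or.inr this

theorem dfs_filter_len_lt (U e : List Int) (w : Int) (hU : w ∈ U) (hw : w ∉ e) :
    (U.filter (fun x => decide (x ∉ e ++ [w]))).length
      < (U.filter (fun x => decide (x ∉ e))).length := by
  induction U with
  | nil => simp at hU
  | cons u rest ih =>
    have hsub : (rest.filter (fun x => decide (x ∉ e ++ [w]))).length
        ≤ (rest.filter (fun x => decide (x ∉ e))).length := by
      apply List.Sublist.length_le
      apply List.monotone_filter_right
      intro x hx
      simp only [decide_eq_true_eq, List.mem_append, List.mem_singleton] at *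
      tauto
    rcases List.mem_cons.mp hU with rfl | hu
    · have h1 : (decide (w ∉ e ++ [w])) = false := by simp
      have h2 : (decide (w ∉ e)) = true := by simpa using hw
      simp only [List.filter_cons, h1, h2, if_false, if_true, List.length_cons,
        Bool.false_eq_true]
      omega
    · have := ih hu
      by_cases hue : u ∈ e
      · have h1 : (decide (u ∉ e ++ [w])) = false := by simp [hue]
        have h2 : (decide (u ∉ e)) = false := by simpa using hue
        simp only [List.filter_cons, h1, h2, if_false, Bool.false_eq_true]
        exact this
      · have h2 : (decide (u ∉ e)) = true := by simpa using hue
        by_cases huw : u = w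
        · subst huw
          have h1 : (decide (u ∉ e ++ [u])) = false := by simp
          simp only [List.filter_cons, h1, h2, if_false, if_true, List.length_cons,
            Bool.false_eq_true]
          omega
        · have h1 : (decide (u ∉ e ++ [w])) = true := by simp [hue, huw]
          simp only [List.filter_cons, h1, h2, if_true, List.length_cons]
          omega

theorem dfsM_lt (graph : List (Int × List Int)) (e : List Int) (w : Int)
    (hU : w ∈ dfsUniv graph) (hw : w ∉ e) : dfsM graph (e ++ [w]) < dfsM graph e :=
  dfs_filter_len_lt (dfsUniv graph) e w hU hw

-- ===== PORT A =====
-- dfsRec graph vertex explored path: the body of A (explored.append(vertex); loop over graph[vertex]).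
-- dfsLoop carries the (proof-only) fact that the neighbours come from an adjacency list, for termination.
mutual
def dfsRec (graph : List (Int × List Int)) (vertex : Int) (explored : List Int) (path : Int) : List Int :=
  match h : dfsGet? graph vertex with
  | none => []   -- Python raises KeyError here; excluded by Pre_dfs
  | some ns => dfsLoop graph ns (explored ++ [vertex]) path
      (dfsGet?_sub graph vertex ns h)
termination_by (dfsM graph (explored ++ [vertex]), 1, 0)

def dfsLoop (graph : List (Int × List Int)) (ns : List Int) (e : List Int) (path : Int)
    (hsub : ∀ x ∈ ns, x ∈ dfsUniv graph) : List Int :=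
  match ns with
  | [] => []
  | w :: ws =>
    (if hw : w ∈ e then [] else (path + 1) :: dfsRec graph w e (path + 1))
      ++ dfsLoop graph ws e path (fun x hx => hsub x (List.mem_cons_of_mem _ hx))
termination_by (dfsM graph e, 0, ns.length)
decreasing_by
  all_goals first
    | (apply Prod.Lex.left
       exact dfsM_lt graph e w (hsub w (List.mem_cons_self ..)) hw)
    | (apply Prod.Lex.right
       apply Prod.Lex.left
       omega)
    | (apply Prod.Lex.right
       apply Prod.Lex.right
       simp)
end

def dfs (graph : List (Int × List Int)) (vertex : Int) (explored : Option (List Int)) (path : Option Int) : List Int :=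
  dfsRec graph vertex (explored.getD []) (path.getD 0)

-- ===== PORT B =====
-- graph[v] for B's walker (missing key = Python KeyError; excluded by Pre_dfs)
def altAdj (graph : List (Int × List Int)) (v : Int) : List Int :=
  (PySem.Dict.get? (PySem.Dict.mk graph) v).getD []

-- B's inner `walk`, with `out` threaded as the accumulator `acc` and a fuel counter as the
-- (proof-only) totality device: dfs_alt hands it more fuel than the recursion can ever use,
-- one unit per level, since each level adds a fresh vertex to `blocked`.
mutual
def altWalk (graph : List (Int × List Int)) (fuel : Nat) (v : Int)
    (blocked : PySem.Set Int) (depth : Int) (acc : List Int) : List Int :=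
  match fuel with
  | 0 => acc
  | Nat.succ f => altFor graph f (altAdj graph v) blocked depth acc
termination_by (fuel, 0)

def altFor (graph : List (Int × List Int)) (f : Nat) (ns : List Int)
    (blocked : PySem.Set Int) (depth : Int) (acc : List Int) : List Int :=
  match ns with
  | [] => acc
  | w :: ws =>
    if PySem.Set.contains blocked w then
      altFor graph f ws blocked depth acc
    else
      altFor graph f ws blocked depth
        (altWalk graph f w (PySem.Set.add blocked w) (depth + 1) (acc ++ [depth]))
termination_by (f, ns.length)
decreasing_by
  all_goals (apply Prod.Lex.right; simp only [List.length_cons]; omega)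
end

def dfs_alt (graph : List (Int × List Int)) (vertex : Int) (explored : Option (List Int)) (path : Option Int) : List Int :=
  altWalk graph ((graph.flatMap Prod.snd).length + 1) vertex
    (PySem.Set.ofList (explored.getD [] ++ [vertex])) (path.getD 0 + 1) []

-- ===== PRECONDITION & SPEC =====
-- one step of the reachability closure: add the not-yet-seen, not-initially-explored neighbours
def dfsStep (graph : List (Int × List Int)) (avoid : List Int) (S : List Int) : List Int :=
  S ++ ((S.flatMap (fun u => (dfsGet? graph u).getD [])).filter
    (fun w => decide (w ∉ avoid) && decide (w ∉ S)))

-- every vertex the search visits: closure of {vertex} under neighbours of keyed vertices,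
-- skipping the initially explored ones and the start vertex (explored the moment the search begins)
def dfsReach (graph : List (Int × List Int)) (vertex : Int) (explored0 : List Int) : List Int :=
  (fun S => dfsStep graph (explored0 ++ [vertex]) S)^[(dfsUniv graph).length + 1] [vertex]

-- Pre_dfs: every vertex the search visits (a reachability closure over the input, not the ports'
-- recursion) is a key of the graph — exactly the inputs on which Python A's graph[...] never raises KeyError.
def Pre_dfs (graph : List (Int × List Int)) (vertex : Int) (explored : Option (List Int)) (path : Option Int) : Prop :=
  ∀ u ∈ dfsReach graph vertex (explored.getD []), u ∈ graph.map Prod.fst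
instance (graph : List (Int × List Int)) (vertex : Int) (explored : Option (List Int)) (path : Option Int) : Decidable (Pre_dfs graph vertex explored path) := by unfold Pre_dfs; infer_instance

def pvWitness_dfs : (List (Int × List Int)) × Int × Option (List Int) × Option Int :=
  ([(0, [1, 2]), (1, [2]), (2, [])], 0, none, none)

def Spec_dfs (graph : List (Int × List Int)) (vertex : Int) (explored : Option (List Int)) (path : Option Int) (out : List Int) : Prop := out = dfs_alt graph vertex explored path
instance (graph : List (Int × List Int)) (vertex : Int) (explored : Option (List Int)) (path : Option Int) (out : List Int) : Decidable (Spec_dfs graph vertex explored path out) := by unfold Spec_dfs; infer_instance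

-- ===== CLAIM (what is proved, stated in full; the proofs are below) =====
def Claim_equal_dfs : Prop := ∀ (graph : List (Int × List Int)) (vertex : Int) (explored : Option (List Int)) (path : Option Int), Dom_dfs graph vertex explored path → Pre_dfs graph vertex explored path → Spec_dfs graph vertex explored path (dfs graph vertex explored path)

-- ===== LEMMAS AND PROOFS =====

-- the body of A after `explored.append(vertex)`: lookup plus loop over the neighbours
def dfsBody (graph : List (Int × List Int)) (v : Int) (exp : List Int) (p : Int) : List Int :=
  match h : dfsGet? graph v with
  | none => []
  | some ns => dfsLoop graph ns exp p (dfsGet?_sub graph v ns h)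

theorem dfsBody_none (graph : List (Int × List Int)) (v : Int) (exp : List Int) (p : Int)
    (h : dfsGet? graph v = none) : dfsBody graph v exp p = [] := by
  unfold dfsBody
  split
  · rfl
  · simp_all

theorem dfsBody_some (graph : List (Int × List Int)) (v : Int) (exp : List Int) (p : Int)
    (ns : List Int) (h : dfsGet? graph v = some ns) :
    dfsBody graph v exp p = dfsLoop graph ns exp p (dfsGet?_sub graph v ns h) := by
  unfold dfsBody
  split
  · simp_all
  · next ns' h' =>
    have : ns' = ns := by rw [h'] at h; injection h
    subst this
    rfl

theorem dfsRec_eq (graph : List (Int × List Int)) (v : Int) (explored : List Int) (p : Int) :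
    dfsRec graph v explored p = dfsBody graph v (explored ++ [v]) p := by
  rw [dfsRec.eq_def]
  unfold dfsBody
  rfl

theorem altAdj_eq (graph : List (Int × List Int)) (v : Int) :
    altAdj graph v = (dfsGet? graph v).getD [] := rfl

-- the inner for-loop, given the outer induction hypothesis for fuel f
theorem altFor_eq (graph : List (Int × List Int)) (f : Nat)
    (ih : ∀ (v : Int) (e : List Int) (blocked : PySem.Set Int) (p : Int) (acc : List Int),
      (∀ x : Int, x ∈ blocked ↔ x ∈ e) → dfsM graph e < f →
      altWalk graph f v blocked (p + 1) acc = acc ++ dfsBody graph v e p) :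
    ∀ (ns e : List Int) (blocked : PySem.Set Int) (p : Int) (acc : List Int)
      (hsub : ∀ x ∈ ns, x ∈ dfsUniv graph),
      (∀ x : Int, x ∈ blocked ↔ x ∈ e) → dfsM graph e ≤ f →
      altFor graph f ns blocked (p + 1) acc = acc ++ dfsLoop graph ns e p hsub := by
  intro ns
  induction ns with
  | nil =>
    intro e blocked p acc hsub hmem hfuel
    rw [altFor, dfsLoop]
    simp
  | cons w ws ihns =>
    intro e blocked p acc hsub hmem hfuel
    rw [altFor, dfsLoop]
    by_cases hw : w ∈ e
    · have hc : PySem.Set.contains blocked w = true :=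
        (PySem.Set.contains_iff _ _).mpr ((hmem w).mpr hw)
      rw [hc, if_pos rfl, dif_pos hw, List.nil_append]
      exact ihns e blocked p acc (fun x hx => hsub x (List.mem_cons_of_mem _ hx)) hmem hfuel
    · have hc : PySem.Set.contains blocked w = false := by
        cases hcb : PySem.Set.contains blocked w
        · rfl
        · exact absurd ((hmem w).mp ((PySem.Set.contains_iff _ _).mp hcb)) hw
      rw [hc, dif_neg hw]
      simp only [Bool.false_eq_true, if_false]
      have hwU : w ∈ dfsUniv graph := hsub w (List.mem_cons_self ..)
      have hlt : dfsM graph (e ++ [w]) < f :=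
        lt_of_lt_of_le (dfsM_lt graph e w hwU hw) hfuel
      have hmem' : ∀ x : Int, x ∈ PySem.Set.add blocked w ↔ x ∈ e ++ [w] := by
        intro x
        rw [PySem.Set.mem_add, hmem x]
        simp
      rw [ih w (e ++ [w]) (PySem.Set.add blocked w) (p + 1) (acc ++ [p + 1]) hmem' hlt]
      rw [ihns e blocked p _ (fun x hx => hsub x (List.mem_cons_of_mem _ hx)) hmem hfuel]
      simp [dfsRec_eq]

theorem altWalk_eq (graph : List (Int × List Int)) :
    ∀ (fuel : Nat) (v : Int) (e : List Int) (blocked : PySem.Set Int) (p : Int) (acc : List Int),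
      (∀ x : Int, x ∈ blocked ↔ x ∈ e) → dfsM graph e < fuel →
      altWalk graph fuel v blocked (p + 1) acc = acc ++ dfsBody graph v e p := by
  intro fuel
  induction fuel with
  | zero => intro v e blocked p acc _ hfuel; exact absurd hfuel (Nat.not_lt_zero _)
  | succ f ihf =>
    intro v e blocked p acc hmem hfuel
    rw [altWalk]
    cases h : dfsGet? graph v with
    | none =>
      have hadj : altAdj graph v = [] := by rw [altAdj_eq, h]; rfl
      rw [hadj, altFor, dfsBody_none graph v e p h]
      simp
    | some ns =>
      have hadj : altAdj graph v = ns := by rw [altAdj_eq, h]; rfl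
      rw [hadj, dfsBody_some graph v e p ns h]
      exact altFor_eq graph f ihf ns e blocked p acc (dfsGet?_sub graph v ns h) hmem
        (Nat.lt_succ_iff.mp hfuel)

-- ===== VERDICT (by name: the statement is the Claim_ definition above) =====
theorem dfs_spec : Claim_equal_dfs := by
  intro graph vertex explored path _ _
  unfold Spec_dfs dfs dfs_alt
  rw [altWalk_eq graph _ vertex (explored.getD [] ++ [vertex])]
  · rw [List.nil_append, dfsRec_eq]
  · intro x
    simp [PySem.Set.mem_ofList]
  · show dfsM graph _ < (dfsUniv graph).length + 1
    have := List.length_filter_le (fun x => decide (x ∉ explored.getD [] ++ [vertex])) (dfsUniv graph)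
    unfold dfsM
    omega
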